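-- pv_equiv track=rewrite | github.com/chenye95/LeetCode_Progress | 583_DeleteOperationsTwoStrings.py | min_delete_distance_lcs_search
-- ===== SOURCE A (Python) =====
-- def min_delete_distance_lcs_search(word1: str, word2: str) -> int:
--     """
--     :param word1: 1 <= word1.length <= 500, English lowercase letter only
--     :param word2: 1 <= word2.length <= 500, English lowercase letter only
--     :return: edit distance with deletion operation only
--     """
--     memorization = [[-1] * (len(word2) + 1) for _ in range(len(word1) + 1)]
--
--     def calculate_longest_common_sequence_dfs(i_1: int, i_2: int) -> int:
--         """
--         :return: longest common sequence of word1[:i_1] and word2[:i_2]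
--         """
--         if i_1 == 0 or i_2 == 0:
--             return 0
--         if memorization[i_1][i_2] == -1:
--             if word1[i_1 - 1] == word2[i_2 - 1]:
--                 memorization[i_1][i_2] = 1 + calculate_longest_common_sequence_dfs(i_1 - 1, i_2 - 1)
--             else:
--                 memorization[i_1][i_2] = max(calculate_longest_common_sequence_dfs(i_1, i_2 - 1),
--                                              calculate_longest_common_sequence_dfs(i_1 - 1, i_2))
--         return memorization[i_1][i_2]
--
--     return len(word1) + len(word2) - 2 * calculate_longest_common_sequence_dfs(len(word1), len(word2))
-- ===== SOURCE B (Python) =====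
-- def min_delete_distance_lcs_search(word1: str, word2: str) -> int:
--     # Bottom-up deletion-distance DP with a single rolling row (no LCS, no recursion).
--     prev = list(range(len(word2) + 1))
--     for i, c1 in enumerate(word1, 1):
--         cur = [i]
--         for j, c2 in enumerate(word2, 1):
--             cur.append(prev[j - 1] if c1 == c2 else 1 + min(prev[j], cur[j - 1]))
--         prev = cur
--     return prev[-1]
-- ===== Notes on version B (the rewrite author's own statement) =====
-- stated objective: faster
-- what changed: Replaces the memoized top-down LCS recursion (returning len1+len2-2*LCS) with an iterative bottom-up deletion-distance DP over a single rolling row, no recursion and no LCS table.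
import Mathlib
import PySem

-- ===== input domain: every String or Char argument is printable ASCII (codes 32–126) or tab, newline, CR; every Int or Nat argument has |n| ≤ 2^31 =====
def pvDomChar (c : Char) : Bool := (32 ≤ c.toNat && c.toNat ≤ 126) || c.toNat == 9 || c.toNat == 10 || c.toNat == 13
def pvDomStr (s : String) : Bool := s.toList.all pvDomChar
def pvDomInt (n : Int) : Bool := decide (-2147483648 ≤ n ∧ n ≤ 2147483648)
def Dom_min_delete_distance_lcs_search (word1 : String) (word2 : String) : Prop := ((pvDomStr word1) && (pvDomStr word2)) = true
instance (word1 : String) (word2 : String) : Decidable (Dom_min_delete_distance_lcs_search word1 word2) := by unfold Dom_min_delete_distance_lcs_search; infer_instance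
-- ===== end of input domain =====

-- B replaces A's memoized top-down LCS recursion with an iterative bottom-up
-- deletion-distance row DP (objective: faster by a constant factor, O(m) space).

-- ===== PORT A =====
-- A's memo table (a (len1+1)x(len2+1) list of lists initialized to -1, entries
-- overwritten in place) is ported as a Dict keyed by (i1, i2) with default -1:
-- lookups/stores hit exactly the same cells with the same values, since every
-- index used is in range.  Indices are the Nats len1..0 / len2..0, so the
-- Python `i_1 == 0` test is the Nat pattern match; word1[i_1 - 1] with
-- 1 ≤ i_1 ≤ len is ported as List.getD (in range, hence exact).
def pvDfsA (w1 w2 : List Char) : Nat → Nat → PySem.Dict (Nat × Nat) Int → Int × PySem.Dict (Nat × Nat) Int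
  | 0, _, m => (0, m)
  | _ + 1, 0, m => (0, m)
  | i + 1, j + 1, m =>
    let m2 :=
      if m.getD (i + 1, j + 1) (-1) = -1 then
        if w1.getD i ' ' = w2.getD j ' ' then
          let r := pvDfsA w1 w2 i j m
          r.2.insert (i + 1, j + 1) (1 + r.1)
        else
          let r1 := pvDfsA w1 w2 (i + 1) j m
          let r2 := pvDfsA w1 w2 i (j + 1) r1.2
          r2.2.insert (i + 1, j + 1) (max r1.1 r2.1)
      else m
    (m2.getD (i + 1, j + 1) (-1), m2)
termination_by i j _ => i + j

def min_delete_distance_lcs_search (word1 : String) (word2 : String) : Int :=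
  let w1 := word1.toList
  let w2 := word2.toList
  (w1.length : Int) + (w2.length : Int) -
    2 * (pvDfsA w1 w2 w1.length w2.length PySem.Dict.empty).1

-- ===== PORT B =====
-- inner loop: `for j, c2 in enumerate(word2, 1): cur.append(...)`
def pvRowB (prev : List Int) (c1 : Char) (i : Int) (w2 : List Char) : List Int :=
  (PySem.List.enumerate w2 1).foldl
    (fun cur p =>
      cur ++ [if c1 = p.2 then PySem.List.pyGetD prev (p.1 - 1) 0
              else 1 + min (PySem.List.pyGetD prev p.1 0) (PySem.List.pyGetD cur (p.1 - 1) 0)])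
    [i]

def min_delete_distance_lcs_search_alt (word1 : String) (word2 : String) : Int :=
  let w2 := word2.toList
  let prev0 := PySem.List.pyRange 0 ((w2.length : Int) + 1) 1
  let final := (PySem.List.enumerate word1.toList 1).foldl
    (fun prev p => pvRowB prev p.2 p.1 w2) prev0
  PySem.List.pyGetD final (-1) 0

-- ===== PRECONDITION & SPEC =====
def Spec_min_delete_distance_lcs_search (word1 : String) (word2 : String) (out : Int) : Prop := out = min_delete_distance_lcs_search_alt word1 word2
instance (word1 : String) (word2 : String) (out : Int) : Decidable (Spec_min_delete_distance_lcs_search word1 word2 out) := by unfold Spec_min_delete_distance_lcs_search; infer_instance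

-- ===== CLAIM (what is proved, stated in full; the proofs are below) =====
def Claim_equal_min_delete_distance_lcs_search : Prop := ∀ (word1 : String) (word2 : String), Dom_min_delete_distance_lcs_search word1 word2 → Spec_min_delete_distance_lcs_search word1 word2 (min_delete_distance_lcs_search word1 word2)

-- ===== LEMMAS AND PROOFS =====

-- reference LCS of the prefixes w1[:i], w2[:j]
def pvLcs (w1 w2 : List Char) : Nat → Nat → Nat
  | 0, _ => 0
  | _ + 1, 0 => 0
  | i + 1, j + 1 =>
    if w1.getD i ' ' = w2.getD j ' ' then pvLcs w1 w2 i j + 1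
    else max (pvLcs w1 w2 (i + 1) j) (pvLcs w1 w2 i (j + 1))
termination_by i j => i + j

-- reference deletion distance of the prefixes w1[:i], w2[:j]
def pvDd (w1 w2 : List Char) : Nat → Nat → Int
  | 0, j => (j : Int)
  | i + 1, 0 => (i : Int) + 1
  | i + 1, j + 1 =>
    if w1.getD i ' ' = w2.getD j ' ' then pvDd w1 w2 i j
    else 1 + min (pvDd w1 w2 (i + 1) j) (pvDd w1 w2 i (j + 1))
termination_by i j => i + j

lemma pvDd_eq (w1 w2 : List Char) :
    ∀ (n i j : Nat), i + j ≤ n →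
      pvDd w1 w2 i j = (i : Int) + (j : Int) - 2 * (pvLcs w1 w2 i j : Int) := by
  intro n
  induction n with
  | zero =>
    intro i j h
    obtain ⟨rfl, rfl⟩ : i = 0 ∧ j = 0 := by omega
    simp [pvDd, pvLcs]
  | succ n ih =>
    intro i j h
    match i, j with
    | 0, j => simp [pvDd, pvLcs]
    | i + 1, 0 => simp [pvDd, pvLcs]
    | i + 1, j + 1 =>
      rw [pvDd, pvLcs]
      by_cases hc : w1.getD i ' ' = w2.getD j ' '
      · simp only [if_pos hc]
        rw [ih i j (by omega)]
        push_cast; ring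
      · simp only [if_neg hc]
        rw [ih (i + 1) j (by omega), ih i (j + 1) (by omega)]
        push_cast
        omega

-- memo invariant: every stored entry is the true LCS value of its cell
def pvInv (w1 w2 : List Char) (m : PySem.Dict (Nat × Nat) Int) : Prop :=
  ∀ i j v, m.get? (i, j) = some v → v = (pvLcs w1 w2 i j : Int)

lemma pvDfsA_spec (w1 w2 : List Char) :
    ∀ (n : Nat), ∀ (i j : Nat) (m : PySem.Dict (Nat × Nat) Int), i + j ≤ n → pvInv w1 w2 m →
      (pvDfsA w1 w2 i j m).1 = (pvLcs w1 w2 i j : Int) ∧ pvInv w1 w2 (pvDfsA w1 w2 i j m).2 := by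
  intro n
  induction n with
  | zero =>
    intro i j m h hm
    obtain ⟨rfl, rfl⟩ : i = 0 ∧ j = 0 := by omega
    exact ⟨by simp [pvDfsA, pvLcs], by simpa [pvDfsA] using hm⟩
  | succ n ih =>
    intro i j m h hm
    match i, j with
    | 0, j => exact ⟨by simp [pvDfsA, pvLcs], by simpa [pvDfsA] using hm⟩
    | i + 1, 0 => exact ⟨by simp [pvDfsA, pvLcs], by simpa [pvDfsA] using hm⟩
    | i + 1, j + 1 =>
      rw [pvDfsA]
      by_cases hmem : m.getD (i + 1, j + 1) (-1) = -1
      · by_cases hc : w1.getD i ' ' = w2.getD j ' '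
        · have hr := ih i j m (by omega) hm
          simp only [if_pos hmem, if_pos hc]
          have hval : (1 : Int) + (pvDfsA w1 w2 i j m).1 = (pvLcs w1 w2 (i + 1) (j + 1) : Int) := by
            rw [hr.1, pvLcs, if_pos hc]; push_cast; ring
          have hinv : pvInv w1 w2 ((pvDfsA w1 w2 i j m).2.insert (i + 1, j + 1) (1 + (pvDfsA w1 w2 i j m).1)) := by
            intro a b v hv
            rw [PySem.Dict.get?_insert] at hv
            split_ifs at hv with heq
            · obtain ⟨ha, hb⟩ := Prod.mk.injEq .. ▸ heq
              subst ha; subst hb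
              injection hv with hv
              rw [← hv]; exact hval
            · exact hr.2 a b v hv
          refine ⟨?_, hinv⟩
          simpa [PySem.Dict.getD_insert_self] using hval
        · have hr1 := ih (i + 1) j m (by omega) hm
          have hr2 := ih i (j + 1) (pvDfsA w1 w2 (i + 1) j m).2 (by omega) hr1.2
          simp only [if_pos hmem, if_neg hc]
          have hval : max (pvDfsA w1 w2 (i + 1) j m).1 (pvDfsA w1 w2 i (j + 1) (pvDfsA w1 w2 (i + 1) j m).2).1
              = (pvLcs w1 w2 (i + 1) (j + 1) : Int) := by
            rw [hr1.1, hr2.1, pvLcs, if_neg hc]; push_cast [Nat.cast_max]; ring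
          have hinv : pvInv w1 w2 ((pvDfsA w1 w2 i (j + 1) (pvDfsA w1 w2 (i + 1) j m).2).2.insert (i + 1, j + 1)
              (max (pvDfsA w1 w2 (i + 1) j m).1 (pvDfsA w1 w2 i (j + 1) (pvDfsA w1 w2 (i + 1) j m).2).1)) := by
            intro a b v hv
            rw [PySem.Dict.get?_insert] at hv
            split_ifs at hv with heq
            · obtain ⟨ha, hb⟩ := Prod.mk.injEq .. ▸ heq
              subst ha; subst hb
              injection hv with hv
              rw [← hv]; exact hval
            · exact hr2.2 a b v hv
          refine ⟨?_, hinv⟩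
          simpa [PySem.Dict.getD_insert_self] using hval
      · simp only [if_neg hmem]
        refine ⟨?_, hm⟩
        rw [PySem.Dict.getD_eq_get?_getD] at hmem ⊢
        cases hg : m.get? (i + 1, j + 1) with
        | none => simp [hg] at hmem
        | some v => simpa using hm (i + 1) (j + 1) v hg

lemma pvRowB_aux (w1 w2 : List Char) (i : Nat) (hi : i < w1.length) :
    ∀ (cs pre : List Char), w2 = pre ++ cs →
      (PySem.List.enumerate cs ((pre.length : Int) + 1)).foldl
        (fun cur p =>
          cur ++ [if w1[i] = p.2 then PySem.List.pyGetD ((List.range (w2.length + 1)).map (fun j => pvDd w1 w2 i j)) (p.1 - 1) 0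
                  else 1 + min (PySem.List.pyGetD ((List.range (w2.length + 1)).map (fun j => pvDd w1 w2 i j)) p.1 0)
                               (PySem.List.pyGetD cur (p.1 - 1) 0)])
        ((List.range (pre.length + 1)).map (fun j => pvDd w1 w2 (i + 1) j))
      = (List.range (w2.length + 1)).map (fun j => pvDd w1 w2 (i + 1) j) := by
  intro cs
  induction cs with
  | nil =>
    intro pre hpre
    have : pre.length = w2.length := by rw [hpre]; simp
    simp [PySem.List.enumerate_nil, this]
  | cons c cs ihc =>
    intro pre hpre
    have hk : pre.length < w2.length := by rw [hpre]; simp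
    have hgi : w1.getD i ' ' = w1[i] := List.getD_eq_getElem w1 ' ' hi
    have hgk : w2.getD pre.length ' ' = c := by
      rw [hpre]
      simp [List.getD]
    rw [PySem.List.enumerate_cons, List.foldl_cons]
    have hcast : ((pre.length : Int) + 1) - 1 = ((pre.length : Nat) : Int) := by ring
    have hcast2 : ((pre.length : Int) + 1) = (((pre.length + 1 : Nat)) : Int) := by push_cast; ring
    have hDd : pvDd w1 w2 (i + 1) (pre.length + 1)
        = if w1[i] = c then pvDd w1 w2 i pre.length
          else 1 + min (pvDd w1 w2 i (pre.length + 1)) (pvDd w1 w2 (i + 1) pre.length) := by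
      rw [pvDd, hgi, hgk]
      rcases eq_or_ne (w1[i]) c with hc | hc
      · rw [if_pos hc, if_pos hc]
      · rw [if_neg hc, if_neg hc, min_comm]
    have e1 : PySem.List.pyGetD ((List.range (w2.length + 1)).map (fun j => pvDd w1 w2 i j)) (((pre.length : Int) + 1) - 1) 0
        = pvDd w1 w2 i pre.length := by
      rw [hcast, PySem.List.pyGetD_natCast, List.getD_eq_getElem _ _ (by simp; omega)]
      simp
    have e2 : PySem.List.pyGetD ((List.range (w2.length + 1)).map (fun j => pvDd w1 w2 i j)) ((pre.length : Int) + 1) 0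
        = pvDd w1 w2 i (pre.length + 1) := by
      rw [hcast2, PySem.List.pyGetD_natCast, List.getD_eq_getElem _ _ (by simp; omega)]
      simp
    have e3 : PySem.List.pyGetD ((List.range (pre.length + 1)).map (fun j => pvDd w1 w2 (i + 1) j)) (((pre.length : Int) + 1) - 1) 0
        = pvDd w1 w2 (i + 1) pre.length := by
      rw [hcast, PySem.List.pyGetD_natCast, List.getD_eq_getElem _ _ (by simp)]
      simp
    have hstep :
        ((List.range (pre.length + 1)).map (fun j => pvDd w1 w2 (i + 1) j)) ++
          [if w1[i] = c then PySem.List.pyGetD ((List.range (w2.length + 1)).map (fun j => pvDd w1 w2 i j)) (((pre.length : Int) + 1) - 1) 0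
           else 1 + min (PySem.List.pyGetD ((List.range (w2.length + 1)).map (fun j => pvDd w1 w2 i j)) ((pre.length : Int) + 1) 0)
                        (PySem.List.pyGetD ((List.range (pre.length + 1)).map (fun j => pvDd w1 w2 (i + 1) j)) (((pre.length : Int) + 1) - 1) 0)]
        = (List.range (pre.length + 1 + 1)).map (fun j => pvDd w1 w2 (i + 1) j) := by
      rw [e1, e2, e3, ← hDd]
      conv_rhs => rw [List.range_succ]
      simp
    rw [hstep]
    have := ihc (pre ++ [c]) (by rw [hpre]; simp)
    rw [List.length_append] at this
    rw [← this]
    norm_num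

lemma pvRowB_spec (w1 w2 : List Char) (i : Nat) (hi : i < w1.length) :
    pvRowB ((List.range (w2.length + 1)).map (fun j => pvDd w1 w2 i j)) (w1[i]) ((i : Int) + 1) w2
      = (List.range (w2.length + 1)).map (fun j => pvDd w1 w2 (i + 1) j) := by
  have h := pvRowB_aux w1 w2 i hi w2 [] rfl
  simpa [pvRowB, pvDd] using h

lemma pvColB_aux (w1 w2 : List Char) :
    ∀ (cs pre : List Char), w1 = pre ++ cs →
      (PySem.List.enumerate cs ((pre.length : Int) + 1)).foldl
        (fun prev p => pvRowB prev p.2 p.1 w2)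
        ((List.range (w2.length + 1)).map (fun j => pvDd w1 w2 pre.length j))
      = (List.range (w2.length + 1)).map (fun j => pvDd w1 w2 w1.length j) := by
  intro cs
  induction cs with
  | nil =>
    intro pre hpre
    have hlen : pre.length = w1.length := by rw [hpre]; simp
    rw [PySem.List.enumerate_nil]
    simp [hlen]
  | cons c cs ihc =>
    intro pre hpre
    have hk : pre.length < w1.length := by rw [hpre]; simp
    have h1 : w1.getD pre.length ' ' = c := by rw [hpre]; simp [List.getD]
    have hgc : w1[pre.length] = c := by rw [← List.getD_eq_getElem w1 ' ' hk, h1]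
    rw [PySem.List.enumerate_cons, List.foldl_cons]
    have hrow := pvRowB_spec w1 w2 pre.length hk
    rw [hgc] at hrow
    rw [hrow]
    have := ihc (pre ++ [c]) (by rw [hpre]; simp)
    rw [List.length_append] at this
    rw [← this]
    norm_num

lemma pvAlt_eq (word1 word2 : String) :
    min_delete_distance_lcs_search_alt word1 word2
      = pvDd word1.toList word2.toList word1.toList.length word2.toList.length := by
  unfold min_delete_distance_lcs_search_alt
  have hinit : PySem.List.pyRange 0 ((word2.toList.length : Int) + 1) 1
      = (List.range (word2.toList.length + 1)).map (fun j => pvDd word1.toList word2.toList 0 j) := by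
    have : ((word2.toList.length : Int) + 1) = ((word2.toList.length + 1 : Nat) : Int) := by push_cast; ring
    rw [this, PySem.List.pyRange_zero_natCast]
    apply List.map_congr_left
    intro j hj
    rw [pvDd]
  have hfold := pvColB_aux word1.toList word2.toList word1.toList []  rfl
  simp only [List.length_nil, Nat.cast_zero, zero_add] at hfold
  simp only [hinit]
  rw [hfold]
  conv_lhs => rw [List.range_succ, List.map_append, List.map_singleton]
  rw [PySem.List.pyGetD_neg_one_append_singleton]

-- ===== VERDICT (by name: the statement is the Claim_ definition above) =====
theorem min_delete_distance_lcs_search_spec : Claim_equal_min_delete_distance_lcs_search := by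
  intro word1 word2 _
  unfold Spec_min_delete_distance_lcs_search
  rw [pvAlt_eq, pvDd_eq word1.toList word2.toList (word1.toList.length + word2.toList.length) _ _ le_rfl]
  unfold min_delete_distance_lcs_search
  have h := pvDfsA_spec word1.toList word2.toList (word1.toList.length + word2.toList.length)
    word1.toList.length word2.toList.length PySem.Dict.empty le_rfl
    (by intro i j v h; simp [PySem.Dict.get?_empty] at h)
  simp only [h.1]
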